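-- pv_equiv track=rewrite | github.com/suraj021617/smartsuraj | app.py | advanced_pattern_mining
-- ===== SOURCE A (Python) =====
-- def advanced_pattern_mining(numbers):
--     """Advanced pattern mining for number sequences"""
--     patterns = {}
--     for i in range(len(numbers) - 2):
--         sequence = numbers[i:i+3]
--         for num in sequence:
--             digit_sum = sum(int(d) for d in num if d.isdigit())
--             if digit_sum % 7 == 0:  # Divisible by 7 pattern
--                 patterns[num] = patterns.get(num, 0) + 3
--             elif digit_sum % 3 == 0:  # Divisible by 3 pattern
--                 patterns[num] = patterns.get(num, 0) + 2
--     return patterns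
-- ===== SOURCE B (Python) =====
-- def advanced_pattern_mining(numbers):
--     """Advanced pattern mining for number sequences (single positional pass)."""
--     n = len(numbers)
--     patterns = {}
--     if n < 3:
--         return patterns
--     for j, num in enumerate(numbers):
--         digit_sum = sum(int(d) for d in num if d.isdigit())
--         increment = 3 if digit_sum % 7 == 0 else (2 if digit_sum % 3 == 0 else 0)
--         if increment:
--             coverage = min(j, n - 3) - max(0, j - 2) + 1
--             patterns[num] = patterns.get(num, 0) + increment * coverage
--     return patterns
-- ===== Notes on version B (the rewrite author's own statement) =====
-- stated objective: faster
-- what changed: Replaces the nested window loop (each length-3 window re-scoring its three members) by a single positional pass that scores each string once and multiplies its increment by a closed-form count of the windows covering that position, doing one dict update per position instead of one per (window, member) pair and one digit-sum per position instead of up to three.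
import Mathlib
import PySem

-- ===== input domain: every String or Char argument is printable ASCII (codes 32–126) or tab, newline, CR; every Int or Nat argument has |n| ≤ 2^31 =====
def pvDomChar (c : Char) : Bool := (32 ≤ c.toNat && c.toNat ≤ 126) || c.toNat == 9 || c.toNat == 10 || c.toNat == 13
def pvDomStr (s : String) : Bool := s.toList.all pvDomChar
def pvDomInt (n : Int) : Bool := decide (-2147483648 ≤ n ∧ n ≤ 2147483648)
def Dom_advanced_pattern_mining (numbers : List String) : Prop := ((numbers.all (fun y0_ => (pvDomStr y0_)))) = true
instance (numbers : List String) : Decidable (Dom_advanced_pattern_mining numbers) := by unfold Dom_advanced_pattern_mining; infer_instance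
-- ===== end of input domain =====

-- B replaces A's nested window loop by a single positional pass with a closed-form count of
-- covering windows (objective: alternative decomposition, one dict update per position).

-- ===== PORT A =====
-- sum(int(d) for d in num if d.isdigit()); int(d) for an ASCII digit d is its code minus 48
-- (exact: the stated domain is printable ASCII, where str.isdigit accepts exactly '0'..'9')
def pvDigitSum (num : String) : Int :=
  (num.toList.filter (fun d => PySem.Chars.isdigit d)).foldl
    (fun acc d => acc + ((d.toNat : Int) - 48)) 0

def advanced_pattern_mining (numbers : List String) : List (String × Int) :=
  ((PySem.List.pyRange 0 ((numbers.length : Int) - 2) 1).foldl (fun patterns i =>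
      (PySem.List.slice numbers (some i) (some (i + 3))).foldl (fun patterns num =>
        let digit_sum := pvDigitSum num
        if PySem.Int.mod digit_sum 7 == 0 then
          patterns.insert num (patterns.getD num 0 + 3)
        else if PySem.Int.mod digit_sum 3 == 0 then
          patterns.insert num (patterns.getD num 0 + 2)
        else patterns) patterns)
    (PySem.Dict.empty : PySem.Dict String Int)).items

-- ===== PORT B =====
-- increment = 3 if digit_sum % 7 == 0 else (2 if digit_sum % 3 == 0 else 0)
def pvInc (num : String) : Int :=
  let digit_sum := pvDigitSum num
  if PySem.Int.mod digit_sum 7 == 0 then 3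
  else if PySem.Int.mod digit_sum 3 == 0 then 2
  else 0

def advanced_pattern_mining_alt (numbers : List String) : List (String × Int) :=
  let n : Int := numbers.length
  if n < 3 then []
  else
    ((PySem.List.enumerate numbers 0).foldl (fun patterns p =>
        let increment := pvInc p.2
        if increment ≠ 0 then
          let coverage := min p.1 (n - 3) - max 0 (p.1 - 2) + 1
          patterns.insert p.2 (patterns.getD p.2 0 + increment * coverage)
        else patterns)
      (PySem.Dict.empty : PySem.Dict String Int)).items

-- ===== PRECONDITION & SPEC =====
def Spec_advanced_pattern_mining (numbers : List String) (out : List (String × Int)) : Prop := out = advanced_pattern_mining_alt numbers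
instance (numbers : List String) (out : List (String × Int)) : Decidable (Spec_advanced_pattern_mining numbers out) := by unfold Spec_advanced_pattern_mining; infer_instance

-- ===== CLAIM (what is proved, stated in full; the proofs are below) =====
def Claim_equal_advanced_pattern_mining : Prop := ∀ (numbers : List String), Dom_advanced_pattern_mining numbers → Spec_advanced_pattern_mining numbers (advanced_pattern_mining numbers)

-- ===== LEMMAS AND PROOFS =====

-- A string scores iff its increment is nonzero
def pvQ (s : String) : Bool := pvInc s != 0

-- the concatenation of all length-3 windows, in A's traversal order
def pvW (l : List String) : List String :=
  (List.range (l.length - 2)).flatMap (fun i => (l.drop i).take 3)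

-- number of windows covering position j in a list of length n
def pvCov (n j : Nat) : Int := min (j : Int) ((n : Int) - 3) - max 0 ((j : Int) - 2) + 1

-- coverage-weighted count of k by positions
def pvSB (l : List String) (k : String) : Int :=
  ((List.range l.length).map (fun j => if l[j]? = some k then pvCov l.length j else 0)).sum

-- the common accumulation step: add val a to key (key a)
def pvAdd {α : Type} (key : α → String) (val : α → Int)
    (d : PySem.Dict String Int) (a : α) : PySem.Dict String Int :=
  d.insert (key a) (d.getD (key a) 0 + val a)

def pvSum {α : Type} (L : List α) (key : α → String) (val : α → Int) (k : String) : Int :=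
  ((L.filter (fun a => key a == k)).map val).sum

theorem pv_foldl_if_filter {α β : Type} (p : α → Bool) (g : β → α → β) (l : List α) (d : β) :
    l.foldl (fun d x => if p x then g d x else d) d = (l.filter p).foldl g d := by
  induction l generalizing d with
  | nil => rfl
  | cons x l ih =>
    simp only [List.foldl_cons, List.filter_cons]
    by_cases h : p x = true
    · simp [h, ih]
    · simp [Bool.eq_false_iff.mpr h, ih]

theorem pv_getD_foldl_pvAdd {α : Type} (key : α → String) (val : α → Int)
    (L : List α) (d : PySem.Dict String Int) (k : String) :
    (L.foldl (pvAdd key val) d).getD k 0 = d.getD k 0 + pvSum L key val k := by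
  induction L generalizing d with
  | nil => simp [pvSum]
  | cons a L ih =>
    simp only [List.foldl_cons, ih, pvSum, List.filter_cons]
    by_cases h : key a = k
    · simp [pvAdd, h, PySem.Dict.getD_insert]
      ring
    · simp [pvAdd, PySem.Dict.getD_insert, Ne.symm h,
        show (key a == k) = false from beq_eq_false_iff_ne.mpr h]

theorem pv_items_foldl_pvAdd {α : Type} (key : α → String) (val : α → Int) (L : List α) :
    (L.foldl (pvAdd key val) (PySem.Dict.empty : PySem.Dict String Int)).items
      = (PySem.Set.ofList (L.map key)).map (fun k => (k, pvSum L key val k)) := by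
  have hnd : (L.foldl (pvAdd key val) (PySem.Dict.empty : PySem.Dict String Int)).keys.Nodup := by
    exact PySem.Dict.nodup_keys_foldl_insert_key L key _ _ (by simp [PySem.Dict.nodup_keys_empty])
  have hkeys : (L.foldl (pvAdd key val) (PySem.Dict.empty : PySem.Dict String Int)).keys
      = PySem.Set.ofList (L.map key) := by
    have := PySem.Dict.keys_foldl_insert_key L key
      (fun d a => d.getD (key a) 0 + val a) (PySem.Dict.empty : PySem.Dict String Int)
    simpa [pvAdd, PySem.Dict.keys_empty, PySem.Set.update_nil_left] using this
  rw [PySem.Dict.items_eq_map_keys _ hnd 0, hkeys]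
  refine List.map_congr_left (fun k hk => ?_)
  rw [pv_getD_foldl_pvAdd]
  simp [PySem.Dict.getD_empty]

theorem pv_ofList_filter (p : String → Bool) (xs : List String) :
    PySem.Set.ofList (xs.filter p) = (PySem.Set.ofList xs).filter p := by
  induction xs using List.reverseRecOn with
  | nil => rfl
  | append_singleton xs x ih =>
    rw [List.filter_append, PySem.Set.ofList_append_singleton, PySem.Set.add_eq_ite]
    by_cases hx : p x = true
    · simp only [List.filter_cons, hx, if_true, List.filter_nil]
      rw [PySem.Set.ofList_append_singleton, PySem.Set.add_eq_ite]
      by_cases hmem : x ∈ xs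
      · rw [if_pos (by simp [PySem.Set.mem_ofList, List.mem_filter, hmem, hx]),
          if_pos (by simp [PySem.Set.mem_ofList, hmem]), ih]
      · rw [if_neg (by simp [PySem.Set.mem_ofList, List.mem_filter, hmem]),
          if_neg (by simp [PySem.Set.mem_ofList, hmem]), ih, List.filter_append]
        simp [hx]
    · simp only [List.filter_cons, hx, Bool.false_eq_true, if_false, List.filter_nil,
        List.append_nil]
      by_cases hmem : x ∈ xs
      · rw [if_pos (by simp [PySem.Set.mem_ofList, hmem]), ih]
      · rw [if_neg (by simp [PySem.Set.mem_ofList, hmem]), List.filter_append, ih]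
        simp [hx]

-- count of k in a list, as a positionally indexed sum
theorem pv_count_eq_sum (t : List String) (k : String) :
    ((t.count k : Nat) : Int)
      = ((List.range t.length).map (fun (j : Nat) => if t[j]? = some k then (1 : Int) else 0)).sum := by
  induction t using List.reverseRecOn with
  | nil => simp
  | append_singleton t x ih =>
    rw [List.count_append, List.length_append]
    simp only [List.length_cons, List.length_nil, Nat.zero_add]
    rw [List.range_add, List.map_append, List.sum_append, List.map_map]
    have h1 : ∀ j ∈ List.range t.length,
        (if (t ++ [x])[j]? = some k then (1 : Int) else 0)
          = (if t[j]? = some k then (1 : Int) else 0) := by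
      intro j hj
      rw [List.getElem?_append_left (List.mem_range.mp hj)]
    rw [List.map_congr_left h1, ← ih]
    have h2 : ((List.range 1).map ((fun (j : Nat) => if (t ++ [x])[j]? = some k then (1 : Int) else 0) ∘ (fun i => t.length + i))).sum
        = if x = k then (1 : Int) else 0 := by
      simp [List.range_one, List.getElem?_append_right (Nat.le_refl t.length)]
    rw [h2]
    by_cases hxk : x = k
    · simp [hxk]
    · simp [hxk, List.count_singleton, beq_eq_false_iff_ne.mpr hxk]

theorem pv_update_of_subset (s : PySem.Set String) (ys : List String)
    (h : ∀ a ∈ ys, a ∈ s) : PySem.Set.update s ys = s := by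
  induction ys generalizing s with
  | nil => rfl
  | cons y ys ih =>
    rw [PySem.Set.update_cons, PySem.Set.add_of_mem (h y (by simp))]
    exact ih s (fun a ha => h a (by simp [ha]))

theorem pv_flatMap_congr {α β : Type} (l : List α) (f g : α → List β)
    (h : ∀ a ∈ l, f a = g a) : l.flatMap f = l.flatMap g := by
  induction l with
  | nil => rfl
  | cons a l ih =>
    simp only [List.flatMap_cons, h a (by simp), ih (fun a ha => h a (by simp [ha]))]

-- the window list of l ++ [x]: the old windows plus one new window (the last two of l, then x)
theorem pv_pvW_append (l : List String) (x : String) (h : 2 ≤ l.length) :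
    pvW (l ++ [x]) = pvW l ++ (l.drop (l.length - 2) ++ [x]) := by
  unfold pvW
  have hlen : (l ++ [x]).length - 2 = (l.length - 2) + 1 := by
    simp only [List.length_append, List.length_cons, List.length_nil]; omega
  rw [hlen, List.range_succ, List.flatMap_append]
  congr 1
  · apply pv_flatMap_congr
    intro i hi
    have hi' : i < l.length - 2 := List.mem_range.mp hi
    rw [List.drop_append_of_le_length (by omega)]
    rw [List.take_append_of_le_length (by simp [List.length_drop]; omega)]
  · have hdrop : (l ++ [x]).drop (l.length - 2) = l.drop (l.length - 2) ++ [x] :=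
      List.drop_append_of_le_length (by omega)
    simp only [List.flatMap_cons, List.flatMap_nil, List.append_nil, hdrop]
    rw [List.take_of_length_le (by simp [List.length_drop]; omega)]

theorem pv_keys_window (l : List String) (h : 3 ≤ l.length) :
    PySem.Set.ofList (pvW l) = PySem.Set.ofList l := by
  induction l using List.reverseRecOn with
  | nil => simp at h
  | append_singleton l x ih =>
    have hl : 2 ≤ l.length := by simp at h; omega
    rw [pv_pvW_append l x hl, ← List.append_assoc, PySem.Set.ofList_append_singleton,
      PySem.Set.ofList_append, PySem.Set.ofList_append_singleton]
    by_cases h2 : 3 ≤ l.length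
    · rw [ih h2, pv_update_of_subset]
      intro a ha
      rw [PySem.Set.mem_ofList]
      exact List.mem_of_mem_drop ha
    · -- l has length exactly 2: pvW l = [] and drop 0 l = l
      have hl2 : l.length = 2 := by omega
      have hW : pvW l = [] := by
        unfold pvW; rw [hl2]; rfl
      rw [hW, hl2]
      simp only [Nat.sub_self, List.drop_zero]
      rw [PySem.Set.ofList_nil, PySem.Set.update_nil_left]

-- pvCov facts
theorem pv_cov_last (n : Nat) (h : 2 ≤ n) : pvCov (n + 1) n = 1 := by
  unfold pvCov
  have h' : (2 : Int) ≤ (n : Int) := by exact_mod_cast h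
  push_cast
  rw [min_def, max_def]
  split_ifs <;> omega

theorem pv_cov_step (n j : Nat) (hn : 3 ≤ n) (hj : j < n) :
    pvCov (n + 1) j = pvCov n j + (if n - 2 ≤ j then (1 : Int) else 0) := by
  unfold pvCov
  have hn' : (3 : Int) ≤ (n : Int) := by exact_mod_cast hn
  have hj' : (j : Int) < (n : Int) := by exact_mod_cast hj
  have hsub : ((n - 2 : Nat) : Int) = (n : Int) - 2 := by omega
  push_cast [hsub]
  rw [min_def, min_def, max_def]
  split_ifs <;> omega

theorem pv_count_window (l : List String) (h : 3 ≤ l.length) (k : String) :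
    (((pvW l).count k : Nat) : Int) = pvSB l k := by
  induction l using List.reverseRecOn with
  | nil => simp at h
  | append_singleton l x ih =>
    by_cases h2 : 3 ≤ l.length
    · -- inductive step: one more window [l[n-2], l[n-1], x]
      have hSB : pvSB (l ++ [x]) k
          = pvSB l k + ((l.drop (l.length - 2)).count k : Int)
            + (if x = k then (1 : Int) else 0) := by
        unfold pvSB
        have hlen : (l ++ [x]).length = l.length + 1 := by simp
        rw [hlen, List.range_succ, List.map_append, List.sum_append]
        have hterm : ((List.map (fun (j : Nat) => if (l ++ [x])[j]? = some k then pvCov (l.length + 1) j else 0) [l.length]).sum)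
            = if x = k then (1 : Int) else 0 := by
          simp only [List.map_cons, List.map_nil, List.sum_cons, List.sum_nil, add_zero]
          rw [List.getElem?_append_right (Nat.le_refl l.length), Nat.sub_self]
          rw [pv_cov_last l.length (by omega)]
          simp
        rw [hterm]
        have hbody : ∀ j ∈ List.range l.length,
            (if (l ++ [x])[j]? = some k then pvCov (l.length + 1) j else 0)
              = (if l[j]? = some k then pvCov l.length j else 0)
                + (if l[j]? = some k ∧ l.length - 2 ≤ j then (1 : Int) else 0) := by
          intro j hj
          have hj' : j < l.length := List.mem_range.mp hj
          rw [List.getElem?_append_left hj']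
          by_cases hk : l[j]? = some k
          · rw [pv_cov_step l.length j h2 hj']
            by_cases hge : l.length - 2 ≤ j
            · simp [hk, hge]
            · simp [hk, hge]
          · simp [hk]
        rw [List.map_congr_left hbody, PySem.List.sum_map_add_int]
        have hsecond : ((List.range l.length).map
              (fun (j : Nat) => if l[j]? = some k ∧ l.length - 2 ≤ j then (1 : Int) else 0)).sum
            = ((l.drop (l.length - 2)).count k : Int) := by
          rw [pv_count_eq_sum (l.drop (l.length - 2)) k]
          set m := l.length - 2 with hm
          have hsplit : l.length = m + 2 := by omega
          rw [hsplit, List.range_add, List.map_append, List.sum_append, List.map_map]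
          have hzero : ((List.range m).map
                (fun (j : Nat) => if l[j]? = some k ∧ m ≤ j then (1 : Int) else 0)).sum = 0 := by
            apply List.sum_eq_zero
            intro y hy
            simp only [List.mem_map, List.mem_range] at hy
            obtain ⟨j, hj, rfl⟩ := hy
            rw [if_neg (by omega)]
          rw [hzero, zero_add]
          have hldr : (l.drop m).length = 2 := by
            rw [List.length_drop]; omega
          rw [hldr]
          apply congrArg
          apply List.map_congr_left
          intro i hi
          simp only [Function.comp_apply, List.getElem?_drop]
          simp [Nat.le_add_right]
        rw [hsecond]
      rw [pv_pvW_append l x (by omega), List.count_append, List.count_append, hSB, ← ih h2]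
      by_cases hxk : x = k <;> simp [List.count_cons, hxk] <;> push_cast <;> ring
    · -- base: l has exactly two elements, a single window [a, b, x]
      have hl2 : l.length = 2 := by simp at h; omega
      match l, hl2 with
      | [a, b], _ =>
        have hW : pvW [a, b, x] = [a, b, x] := by
          unfold pvW; rfl
        simp only [List.cons_append, List.nil_append]
        rw [hW]
        norm_num [pvSB, pvCov, List.range_succ, List.count_cons, List.count_nil]
        split_ifs <;> push_cast <;> omega

theorem pv_enum_sum (k : String) (g : Int → Int) (l : List String) (s : Int) :
    ((((PySem.List.enumerate l s).filter (fun p => p.2 == k)).map (fun p => g p.1)).sum : Int)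
      = ((List.range l.length).map (fun (j : Nat) => if l[j]? = some k then g (s + (j : Int)) else 0)).sum := by
  induction l generalizing s with
  | nil => simp [PySem.List.enumerate]
  | cons a l ih =>
    rw [PySem.List.enumerate_cons]
    simp only [List.length_cons, List.range_succ_eq_map, List.map_cons, List.map_map,
      List.sum_cons, List.getElem?_cons_zero, List.filter_cons]
    have hcast : ∀ (j : Nat), s + ((j + 1 : Nat) : Int) = (s + 1) + (j : Int) := by
      intro j; push_cast; ring
    have htail : ((List.range l.length).map ((fun (j : Nat) =>
          if (a :: l)[j]? = some k then g (s + (j : Int)) else 0) ∘ Nat.succ)).sum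
        = ((List.range l.length).map (fun (j : Nat) =>
          if l[j]? = some k then g ((s + 1) + (j : Int)) else 0)).sum := by
      apply congrArg
      apply List.map_congr_left
      intro j hj
      simp only [Function.comp_apply, List.getElem?_cons_succ, Nat.succ_eq_add_one, hcast]
    rw [htail, ← ih (s + 1)]
    by_cases hak : a = k
    · simp [hak]
    · simp [hak, beq_eq_false_iff_ne.mpr hak, Ne.symm hak]

theorem pv_sum_filter_eq (M : List String) (v : String → Int) (k : String) :
    ((M.filter (fun a => a == k)).map v).sum = v k * ((M.count k : Nat) : Int) := by
  induction M with
  | nil => simp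
  | cons a M ih =>
    rw [List.filter_cons]
    by_cases hak : a = k
    · subst hak
      simp only [BEq.rfl, if_true, List.map_cons, List.sum_cons, List.count_cons, ih]
      push_cast
      ring
    · simp only [beq_eq_false_iff_ne.mpr hak, Bool.false_eq_true, if_false, ih,
        List.count_cons, beq_eq_false_iff_ne.mpr hak]
      push_cast
      ring

theorem pv_A_norm (l : List String) :
    advanced_pattern_mining l
      = (((pvW l).filter pvQ).foldl (pvAdd id pvInc)
          (PySem.Dict.empty : PySem.Dict String Int)).items := by
  unfold advanced_pattern_mining
  rw [PySem.List.pyRange_one, List.foldl_map]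
  have hwin : ∀ (acc : PySem.Dict String Int), ∀ i ∈ List.range ((((l.length : Int)) - 2 - 0).toNat),
      (PySem.List.slice l (some (0 + (i : Int))) (some (0 + (i : Int) + 3))).foldl
        (fun patterns num =>
          let digit_sum := pvDigitSum num
          if PySem.Int.mod digit_sum 7 == 0 then patterns.insert num (patterns.getD num 0 + 3)
          else if PySem.Int.mod digit_sum 3 == 0 then patterns.insert num (patterns.getD num 0 + 2)
          else patterns) acc
      = ((l.drop i).take 3).foldl
        (fun patterns num =>
          let digit_sum := pvDigitSum num
          if PySem.Int.mod digit_sum 7 == 0 then patterns.insert num (patterns.getD num 0 + 3)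
          else if PySem.Int.mod digit_sum 3 == 0 then patterns.insert num (patterns.getD num 0 + 2)
          else patterns) acc := by
    intro acc i _
    have hs : PySem.List.slice l (some (0 + (i : Int))) (some (0 + (i : Int) + 3))
        = (l.drop i).take 3 := by
      rw [zero_add]
      simpa using PySem.List.slice_natCast_add l i 3
    rw [hs]
  rw [PySem.List.foldl_congr_mem _ _ _ _ hwin, ← List.foldl_flatMap]
  have hc : ((l.length : Int) - 2 - 0).toNat = l.length - 2 := by omega
  rw [hc]
  have hstep : (fun (patterns : PySem.Dict String Int) (num : String) =>
        let digit_sum := pvDigitSum num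
        if PySem.Int.mod digit_sum 7 == 0 then patterns.insert num (patterns.getD num 0 + 3)
        else if PySem.Int.mod digit_sum 3 == 0 then patterns.insert num (patterns.getD num 0 + 2)
        else patterns)
      = fun patterns num => if pvQ num then pvAdd id pvInc patterns num else patterns := by
    funext d num
    simp only [pvQ, pvInc, pvAdd, id]
    by_cases h7 : (PySem.Int.mod (pvDigitSum num) 7 == 0) = true
    · rw [if_pos h7, if_pos h7, if_pos (by decide)]
    · rw [if_neg h7, if_neg h7]
      by_cases h3 : (PySem.Int.mod (pvDigitSum num) 3 == 0) = true
      · rw [if_pos h3, if_pos h3, if_pos (by decide)]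
      · rw [if_neg h3, if_neg h3, if_neg (by decide)]
  rw [hstep, pv_foldl_if_filter]
  rfl

theorem pv_B_norm (l : List String) (h : 3 ≤ l.length) :
    advanced_pattern_mining_alt l
      = (((PySem.List.enumerate l 0).filter (fun p => pvQ p.2)).foldl
          (pvAdd Prod.snd
            (fun p => pvInc p.2 * (min p.1 ((l.length : Int) - 3) - max 0 (p.1 - 2) + 1)))
          (PySem.Dict.empty : PySem.Dict String Int)).items := by
  simp only [advanced_pattern_mining_alt]
  rw [if_neg (by push_cast; omega)]
  have hstep : (fun (patterns : PySem.Dict String Int) (p : Int × String) =>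
        let increment := pvInc p.2
        if increment ≠ 0 then
          let coverage := min p.1 ((l.length : Int) - 3) - max 0 (p.1 - 2) + 1
          patterns.insert p.2 (patterns.getD p.2 0 + increment * coverage)
        else patterns)
      = fun patterns p => if pvQ p.2 then
          pvAdd Prod.snd
            (fun p => pvInc p.2 * (min p.1 ((l.length : Int) - 3) - max 0 (p.1 - 2) + 1))
            patterns p
        else patterns := by
    funext d p
    simp only [pvQ, pvAdd]
    by_cases h0 : pvInc p.2 = 0
    · simp [h0]
    · simp [h0]
  rw [hstep, pv_foldl_if_filter]

-- ===== VERDICT (by name: the statement is the Claim_ definition above) =====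
theorem advanced_pattern_mining_spec : Claim_equal_advanced_pattern_mining := by
  intro l _
  unfold Spec_advanced_pattern_mining
  by_cases h3 : 3 ≤ l.length
  · rw [pv_A_norm, pv_B_norm l h3, pv_items_foldl_pvAdd, pv_items_foldl_pvAdd]
    rw [List.map_id]
    have hkeys : PySem.Set.ofList ((pvW l).filter pvQ) = PySem.Set.ofList (l.filter pvQ) := by
      rw [pv_ofList_filter, pv_keys_window l h3, ← pv_ofList_filter]
    have hkeysB : ((PySem.List.enumerate l 0).filter (fun p => pvQ p.2)).map Prod.snd
        = l.filter pvQ := by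
      have hfm := List.filter_map (f := fun (p : Int × String) => p.2) (p := pvQ)
        (l := PySem.List.enumerate l 0)
      rw [PySem.List.map_snd_enumerate] at hfm
      simpa using hfm.symm
    rw [hkeys, hkeysB]
    apply List.map_congr_left
    intro kk hkk
    have hq : pvQ kk = true := by
      have hmem : kk ∈ l.filter pvQ := (PySem.Set.mem_ofList _ _).mp hkk
      exact (List.mem_filter.mp hmem).2
    have hA : pvSum ((pvW l).filter pvQ) id pvInc kk = pvInc kk * pvSB l kk := by
      unfold pvSum
      simp only [id]
      rw [pv_sum_filter_eq, List.count_filter hq, pv_count_window l h3]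
    have hB : pvSum ((PySem.List.enumerate l 0).filter (fun p => pvQ p.2)) Prod.snd
        (fun p => pvInc p.2 * (min p.1 ((l.length : Int) - 3) - max 0 (p.1 - 2) + 1)) kk
        = pvInc kk * pvSB l kk := by
      unfold pvSum
      rw [List.filter_filter]
      have hcond : ∀ a ∈ PySem.List.enumerate l 0,
          ((Prod.snd a == kk) && pvQ a.2) = (a.2 == kk) := by
        intro a _
        by_cases hak : a.2 = kk
        · simp [hak, hq]
        · simp [beq_eq_false_iff_ne.mpr hak]
      rw [List.filter_congr hcond]
      have hmap : ∀ a ∈ (PySem.List.enumerate l 0).filter (fun a => a.2 == kk),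
          (fun (p : Int × String) => pvInc p.2 * (min p.1 ((l.length : Int) - 3) - max 0 (p.1 - 2) + 1)) a
            = pvInc kk * (min a.1 ((l.length : Int) - 3) - max 0 (a.1 - 2) + 1) := by
        intro a ha
        have h2 : a.2 = kk := by simpa using (List.mem_filter.mp ha).2
        simp only [h2]
      rw [List.map_congr_left hmap, List.sum_map_mul_left]
      rw [pv_enum_sum kk (fun i => min i ((l.length : Int) - 3) - max 0 (i - 2) + 1) l 0]
      unfold pvSB pvCov
      congr 1
      apply congrArg
      apply List.map_congr_left
      intro j hj
      simp
    rw [hA, hB]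
  · have hA : advanced_pattern_mining l = [] := by
      unfold advanced_pattern_mining
      rw [PySem.List.pyRange_one_eq_nil (by push_cast; omega)]
      rfl
    have hB : advanced_pattern_mining_alt l = [] := by
      simp only [advanced_pattern_mining_alt]
      rw [if_pos (by push_cast; omega)]
    rw [hA, hB]
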